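-- pv_equiv track=rewrite | github.com/jonesaaronj/rom-tools | forcecrc.py | multiplyMod
-- ===== SOURCE A (Python) =====
-- POLYNOMIAL = 0x104C11DB7
--
-- def multiplyMod(x: int, y: int) -> int:
-- 	# Russian peasant multiplication algorithm
-- 	z: int = 0
-- 	while y != 0:
-- 		z ^= x * (y & 1)
-- 		y >>= 1
-- 		x <<= 1
-- 		if (x >> 32) & 1 != 0:
-- 			x ^= POLYNOMIAL
-- 	return z
-- ===== SOURCE B (Python) =====
-- POLYNOMIAL = 0x104C11DB7
--
-- def multiplyMod(x: int, y: int) -> int: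
-- 	# Phase 1: full GF(2) carryless product (no modular reduction).
-- 	p = 0
-- 	while y != 0:
-- 		if y & 1:
-- 			p ^= x
-- 		x <<= 1
-- 		y >>= 1
-- 	# Phase 2: reduce modulo the 33-bit polynomial, top bit down to bit 32.
-- 	for i in range(p.bit_length() - 1, 31, -1):
-- 		if (p >> i) & 1:
-- 			p ^= POLYNOMIAL << (i - 32)
-- 	return p
-- ===== Notes on version B (the rewrite author's own statement) =====
-- stated objective: alternative
-- what changed: B splits A's interleaved Russian-peasant multiply-with-reduction into two separate phases: first the full GF(2) carryless product of x and y with no reduction, then a single top-down pass that reduces the product modulo the 33-bit polynomial; Pre_ excludes y < 0 (A loops forever there) and x < 0, which is outside the GF(2)/CRC domain and where A's value is a two's-complement accident.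
-- outside the precondition, e.g. on multiplyMod(-1, 3): A returns 4374732214, B returns 1
import Mathlib
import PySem

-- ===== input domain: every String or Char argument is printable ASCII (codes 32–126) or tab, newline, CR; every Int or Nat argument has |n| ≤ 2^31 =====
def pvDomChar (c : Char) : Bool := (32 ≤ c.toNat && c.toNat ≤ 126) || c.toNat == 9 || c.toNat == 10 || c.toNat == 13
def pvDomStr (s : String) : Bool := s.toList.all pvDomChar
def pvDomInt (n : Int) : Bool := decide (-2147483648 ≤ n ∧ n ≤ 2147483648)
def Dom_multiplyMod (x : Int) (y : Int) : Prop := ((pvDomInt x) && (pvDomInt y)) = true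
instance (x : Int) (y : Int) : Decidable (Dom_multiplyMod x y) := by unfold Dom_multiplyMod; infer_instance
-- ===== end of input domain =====

-- B replaces A's interleaved Russian-peasant multiply-and-reduce by two separate phases:
-- a full carryless product first, then one top-down modular reduction pass (objective: alternative).
-- Return-value equivalence on Pre_ (0 ≤ x and 0 ≤ y): Python A loops forever for y < 0, and
-- negative x is outside the GF(2)/CRC domain of the function (two's-complement accident in A).

def pvPoly : Nat := 0x104C11DB7

-- ===== PORT A =====
-- A's while-loop, transliterated over Nat (Pre_ restricts to nonnegative inputs):
-- z ^= x * (y & 1); y >>= 1; x <<= 1; if (x >> 32) & 1 != 0: x ^= POLYNOMIAL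
def mmA (x y z : Nat) : Nat :=
  if h : y = 0 then z
  else
    let z' := z ^^^ x * (y &&& 1)
    let y' := y >>> 1
    let x' := x <<< 1
    let x'' := if (x' >>> 32) &&& 1 ≠ 0 then x' ^^^ pvPoly else x'
    mmA x'' y' z'
termination_by y
decreasing_by simpa [Nat.shiftRight_one] using Nat.div_lt_self (Nat.pos_of_ne_zero h) one_lt_two

def multiplyMod (x : Int) (y : Int) : Int :=
  -- totality guard only: Python A never returns for y < 0 (infinite loop); x < 0 is excluded by Pre_
  if x < 0 ∨ y < 0 then 0
  else Int.ofNat (mmA x.toNat y.toNat 0)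

-- ===== PORT B =====
-- Phase 1 of Source B: full carryless product (no reduction): if y & 1: p ^= x; x <<= 1; y >>= 1
def mmP (x y p : Nat) : Nat :=
  if h : y = 0 then p
  else mmP (x <<< 1) (y >>> 1) (if y &&& 1 ≠ 0 then p ^^^ x else p)
termination_by y
decreasing_by simpa [Nat.shiftRight_one] using Nat.div_lt_self (Nat.pos_of_ne_zero h) one_lt_two

-- Phase 2 of Source B: for i in range(bl-1, 31, -1): if (p >> i) & 1: p ^= POLYNOMIAL << (i-32).
-- The loop counter is re-indexed as k = i - 31, counting the remaining iterations; the bit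
-- examined when k+1 iterations remain is i = 32 + k, and the shift is i - 32 = k.
def mmRed : Nat → Nat → Nat
  | 0, p => p
  | k+1, p => mmRed k (if (p >>> (32 + k)) &&& 1 ≠ 0 then p ^^^ (pvPoly <<< k) else p)

def multiplyMod_alt (x : Int) (y : Int) : Int :=
  if x < 0 ∨ y < 0 then 0
  else
    let p := mmP x.toNat y.toNat 0
    -- p.bit_length() - 1 - 31 iterations: bit_length p = log2 p + 1 for p > 0
    Int.ofNat (mmRed (Nat.log2 p - 31) p)

-- ===== PRECONDITION & SPEC =====
-- Pre_ excludes y < 0, on which Python A loops forever, and x < 0, which lies outside the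
-- natural GF(2)/CRC domain: there A's value is a two's-complement accident B does not reproduce.
def Pre_multiplyMod (x : Int) (y : Int) : Prop := 0 ≤ x ∧ 0 ≤ y
instance (x : Int) (y : Int) : Decidable (Pre_multiplyMod x y) := by unfold Pre_multiplyMod; infer_instance
def pvWitness_multiplyMod : Int × Int := (3, 5)

def Spec_multiplyMod (x : Int) (y : Int) (out : Int) : Prop := out = multiplyMod_alt x y
instance (x : Int) (y : Int) (out : Int) : Decidable (Spec_multiplyMod x y out) := by unfold Spec_multiplyMod; infer_instance

-- ===== CLAIM (what is proved, stated in full; the proofs are below) =====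
def Claim_equal_multiplyMod : Prop := ∀ (x : Int) (y : Int), Dom_multiplyMod x y → Pre_multiplyMod x y → Spec_multiplyMod x y (multiplyMod x y)

-- ===== LEMMAS AND PROOFS =====

-- bridge: the ports' "(n >> s) & 1 != 0" is Nat.testBit
theorem pvBit_iff (n s : Nat) : ((n >>> s) &&& 1 ≠ 0) ↔ n.testBit s = true := by
  rw [Nat.and_comm, Nat.testBit]; simp [bne]

-- one conditional-reduction step of A, factored out for the algebra below
def pvR (x : Nat) : Nat := if (x <<< 1).testBit 32 then (x <<< 1) ^^^ pvPoly else (x <<< 1)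

theorem pvXorShift (a b : Nat) : (a ^^^ b) <<< 1 = a <<< 1 ^^^ b <<< 1 := by
  apply Nat.eq_of_testBit_eq; intro i
  simp only [Nat.testBit_xor, Nat.testBit_shiftLeft]
  cases (decide (i ≥ 1)) <;> simp

theorem testBit_eq_decide (n s : Nat) : n.testBit s = decide (n / 2^s % 2 = 1) := by
  rw [Nat.testBit, Nat.shiftRight_eq_div_pow, Nat.one_and_eq_mod_two]
  rcases Nat.mod_two_eq_zero_or_one (n / 2^s) with h | h <;> simp [h]

theorem topbit_lt {n s : Nat} (h : n < 2^(s+1)) (hb : n.testBit s = false) : n < 2^s := by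
  rw [testBit_eq_decide] at hb
  simp only [decide_eq_false_iff_not] at hb
  have hpos : 0 < 2^s := Nat.two_pow_pos s
  have hq : n / 2^s < 2 := by
    rw [Nat.div_lt_iff_lt_mul hpos]
    calc n < 2^(s+1) := h
    _ = 2 * 2^s := by ring
  have hdm := Nat.div_add_mod n (2^s)
  have hm : n % 2^s < 2^s := Nat.mod_lt n hpos
  generalize hqdef : n / 2^s = q at hq hb hdm
  have h0 : q = 0 := by omega
  rw [h0, Nat.mul_zero, Nat.zero_add] at hdm
  omega

theorem pvPoly_testBit : pvPoly.testBit 32 = true := by decide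

theorem pvPoly_lt : pvPoly < 2^33 := by norm_num [pvPoly]

theorem xor_left_comm' (x y z : Nat) : x ^^^ (y ^^^ z) = y ^^^ (x ^^^ z) := by
  rw [← Nat.xor_assoc, Nat.xor_comm x y, Nat.xor_assoc]

theorem pvR_linear (a b : Nat) : pvR (a ^^^ b) = pvR a ^^^ pvR b := by
  unfold pvR
  rw [pvXorShift, Nat.testBit_xor]
  cases ha : (a <<< 1).testBit 32 <;> cases hb : (b <<< 1).testBit 32 <;>
    simp [Nat.xor_comm, xor_left_comm']

theorem mmA_zero (x z : Nat) : mmA x 0 z = z := by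
  unfold mmA; rfl

theorem pvR_eq (x : Nat) :
    pvR x = (if (x <<< 1 >>> 32) &&& 1 ≠ 0 then x <<< 1 ^^^ pvPoly else x <<< 1) := by
  simp only [pvR, pvBit_iff]

theorem mmA_succ (x z : Nat) {y : Nat} (h : y ≠ 0) :
    mmA x y z = mmA (pvR x) (y / 2) (z ^^^ x * (y % 2)) := by
  rw [mmA]
  simp only [dif_neg h, pvR_eq, Nat.shiftRight_one, Nat.and_one_is_mod]

theorem mmP_zero (x p : Nat) : mmP x 0 p = p := by
  unfold mmP; rfl

theorem mmP_succ (x p : Nat) {y : Nat} (h : y ≠ 0) :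
    mmP x y p = mmP (x <<< 1) (y / 2) (if y % 2 = 1 then p ^^^ x else p) := by
  rw [mmP]; simp [h, Nat.shiftRight_one, Nat.and_one_is_mod]

theorem mmA_acc (y : Nat) : ∀ x z, mmA x y z = z ^^^ mmA x y 0 := by
  induction y using Nat.strong_induction_on with
  | _ y ih =>
    intro x z
    rcases eq_or_ne y 0 with rfl | h
    · simp [mmA_zero]
    · have hy : y / 2 < y := Nat.div_lt_self (Nat.pos_of_ne_zero h) one_lt_two
      rw [mmA_succ x z h, mmA_succ x 0 h, ih _ hy (pvR x) (z ^^^ x * (y % 2)),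
        ih _ hy (pvR x) (0 ^^^ x * (y % 2))]
      simp [Nat.xor_assoc]

theorem pvR_zero : pvR 0 = 0 := by decide

theorem pvR_mul_bit (x b : Nat) (hb : b = 0 ∨ b = 1) : pvR (x * b) = pvR x * b := by
  rcases hb with rfl | rfl
  · simp [pvR_zero]
  · simp

theorem mmA_R (y : Nat) : ∀ x, mmA (pvR x) y 0 = pvR (mmA x y 0) := by
  induction y using Nat.strong_induction_on with
  | _ y ih =>
    intro x
    rcases eq_or_ne y 0 with rfl | h
    · simp [mmA_zero, pvR_zero]
    · have hy : y / 2 < y := Nat.div_lt_self (Nat.pos_of_ne_zero h) one_lt_two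
      rw [mmA_succ (pvR x) 0 h, mmA_succ x 0 h, mmA_acc _ _ _, mmA_acc _ (pvR x) _,
        ih _ hy (pvR x), pvR_linear]
      rw [Nat.zero_xor, Nat.zero_xor, pvR_mul_bit x (y % 2) (Nat.mod_two_eq_zero_or_one y)]

theorem mmP_acc (y : Nat) : ∀ x p, mmP x y p = p ^^^ mmP x y 0 := by
  induction y using Nat.strong_induction_on with
  | _ y ih =>
    intro x p
    rcases eq_or_ne y 0 with rfl | h
    · simp [mmP_zero]
    · have hy : y / 2 < y := Nat.div_lt_self (Nat.pos_of_ne_zero h) one_lt_two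
      rw [mmP_succ x p h, mmP_succ x 0 h,
        ih _ hy (x <<< 1) (if y % 2 = 1 then p ^^^ x else p),
        ih _ hy (x <<< 1) (if y % 2 = 1 then 0 ^^^ x else 0)]
      rcases Nat.mod_two_eq_zero_or_one y with h2 | h2 <;> simp [h2, Nat.xor_assoc]

theorem mmP_unfold (x : Nat) {y : Nat} (h : y ≠ 0) :
    mmP x y 0 = (if y % 2 = 1 then x else 0) ^^^ (mmP (x <<< 1) (y / 2) 0) := by
  rw [mmP_succ x 0 h, mmP_acc]
  rcases Nat.mod_two_eq_zero_or_one y with h2 | h2 <;> simp [h2]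

theorem mmP_double (y : Nat) : ∀ x, mmP (x <<< 1) y 0 = (mmP x y 0) <<< 1 := by
  induction y using Nat.strong_induction_on with
  | _ y ih =>
    intro x
    rcases eq_or_ne y 0 with rfl | h
    · simp [mmP_zero]
    · have hy : y / 2 < y := Nat.div_lt_self (Nat.pos_of_ne_zero h) one_lt_two
      rw [mmP_unfold (x <<< 1) h, mmP_unfold x h, ih _ hy (x <<< 1), pvXorShift]
      rcases Nat.mod_two_eq_zero_or_one y with h2 | h2 <;> simp [h2]

theorem mmP_lt (b : Nat) : ∀ y, y < 2^b → ∀ a x, x < 2^a → mmP x y 0 < 2^(a+b) := by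
  induction b with
  | zero =>
    intro y hy a x hx
    interval_cases y
    simp only [mmP_zero]
    have : (0:Nat) < 2^(a+0) := Nat.two_pow_pos _
    omega
  | succ b ih =>
    intro y hy a x hx
    rcases eq_or_ne y 0 with rfl | h
    · simp only [mmP_zero]
      exact Nat.two_pow_pos _
    · have hy2 : y / 2 < 2^b := by
        have h2 : y < 2^b * 2 := by rw [← pow_succ]; exact hy
        omega
      have hrec : mmP x (y / 2) 0 < 2^(a+b) := ih (y / 2) hy2 a x hx
      rw [mmP_unfold x h]
      apply Nat.xor_lt_two_pow
      · rcases Nat.mod_two_eq_zero_or_one y with h2 | h2 <;> rw [h2]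
        · rw [if_neg (by norm_num)]
          exact Nat.two_pow_pos (a+(b+1))
        · rw [if_pos rfl]
          calc x < 2^a := hx
          _ ≤ 2^(a+(b+1)) := Nat.pow_le_pow_right (by norm_num) (by omega)
      · rw [mmP_double, Nat.shiftLeft_eq, pow_one]
        have : 2^(a+(b+1)) = 2^(a+b) * 2 := by ring
        omega

theorem mmRed_succ (k p : Nat) :
    mmRed (k+1) p = mmRed k (if p.testBit (32+k) then p ^^^ (pvPoly <<< k) else p) := by
  simp only [mmRed, pvBit_iff]

theorem mmRed_id : ∀ k p, p < 2^32 → mmRed k p = p := by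
  intro k
  induction k with
  | zero => intro p _; rfl
  | succ k ih =>
    intro p hp
    have hb : p.testBit (32+k) = false :=
      Nat.testBit_lt_two_pow (lt_of_lt_of_le hp (Nat.pow_le_pow_right (by norm_num) (by omega)))
    rw [mmRed_succ, hb]
    simp only [Bool.false_eq_true, if_false]
    exact ih p hp

theorem mmRed_linear : ∀ k a b, mmRed k (a ^^^ b) = mmRed k a ^^^ mmRed k b := by
  intro k
  induction k with
  | zero => intro a b; rfl
  | succ k ih =>
    intro a b
    rw [mmRed_succ k (a ^^^ b), mmRed_succ k a, mmRed_succ k b, Nat.testBit_xor]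
    cases ha : a.testBit (32+k) <;> cases hb : b.testBit (32+k) <;>
      simp only [Bool.xor_false, Bool.xor_true, Bool.not_true, Bool.not_false,
        Bool.false_eq_true, if_true, if_false]
    · exact ih a b
    · have : a ^^^ b ^^^ pvPoly <<< k = a ^^^ (b ^^^ pvPoly <<< k) := by
        rw [Nat.xor_assoc]
      rw [this, ih]
    · have : a ^^^ b ^^^ pvPoly <<< k = (a ^^^ pvPoly <<< k) ^^^ b := by
        rw [Nat.xor_assoc, Nat.xor_comm b, ← Nat.xor_assoc]
      rw [this, ih]
    · have heq : a ^^^ pvPoly <<< k ^^^ (b ^^^ pvPoly <<< k) = a ^^^ b := by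
        rw [Nat.xor_assoc, xor_left_comm' (pvPoly <<< k) b, Nat.xor_self, Nat.xor_zero]
      rw [← heq, ih]

theorem mmRed_stable : ∀ m k p, p < 2^(32+k) → k ≤ m → mmRed m p = mmRed k p := by
  intro m
  induction m with
  | zero => intro k p _ hk; interval_cases k; rfl
  | succ m ih =>
    intro k p hp hk
    rcases eq_or_ne k (m+1) with rfl | hne
    · rfl
    · have hk' : k ≤ m := by omega
      have hb : p.testBit (32+m) = false :=
        Nat.testBit_lt_two_pow (lt_of_lt_of_le hp (Nat.pow_le_pow_right (by norm_num) (by omega)))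
      rw [mmRed_succ, hb]
      simp only [Bool.false_eq_true, if_false]
      exact ih k p hp hk' 

theorem shiftLeft_one_testBit (u j : Nat) : (u <<< 1).testBit (j+1) = u.testBit j := by
  simp [Nat.testBit_shiftLeft]

theorem shiftLeft_succ_eq (a k : Nat) : a <<< (k+1) = (a <<< k) <<< 1 := by
  simp [Nat.shiftLeft_eq, pow_succ]; ring

theorem mmRed_R : ∀ k u, u < 2^(32+k) → mmRed (k+1) (u <<< 1) = pvR (mmRed k u) := by
  intro k
  induction k with
  | zero =>
    intro u hu
    rw [mmRed_succ 0 (u <<< 1)]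
    simp only [mmRed, Nat.shiftLeft_zero, Nat.add_zero]
    rfl
  | succ k ih =>
    intro u hu
    have htb : (u <<< 1).testBit (32+(k+1)) = u.testBit (32+k) := by
      have : 32+(k+1) = (32+k)+1 := by omega
      rw [this, shiftLeft_one_testBit]
    rw [mmRed_succ (k+1) (u <<< 1), htb, mmRed_succ k u]
    cases hb : u.testBit (32+k) with
    | false =>
      simp only [Bool.false_eq_true, if_false]
      have hu' : u < 2^(32+k) := by
        have : (32 + (k+1)) = (32+k)+1 := by omega
        rw [this] at hu
        exact topbit_lt hu hb
      exact ih u hu'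
    | true =>
      simp only [if_true]
      have harg : u <<< 1 ^^^ pvPoly <<< (k+1) = (u ^^^ pvPoly <<< k) <<< 1 := by
        rw [shiftLeft_succ_eq pvPoly k, pvXorShift]
      rw [harg]
      have hu' : u ^^^ pvPoly <<< k < 2^(32+k) := by
        have h1 : u ^^^ pvPoly <<< k < 2^((32+k)+1) := by
          apply Nat.xor_lt_two_pow
          · have : (32+(k+1)) = (32+k)+1 := by omega
            rw [this] at hu; exact hu
          · rw [Nat.shiftLeft_eq]
            calc pvPoly * 2^k < 2^33 * 2^k := by
                  have h33 := pvPoly_lt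
                  have hk := Nat.two_pow_pos k
                  exact Nat.mul_lt_mul_of_lt_of_le h33 (le_refl _) hk
            _ = 2^((32+k)+1) := by rw [← pow_add]; ring_nf
        have h2 : (u ^^^ pvPoly <<< k).testBit (32+k) = false := by
          rw [Nat.testBit_xor, hb]
          have : (pvPoly <<< k).testBit (32+k) = true := by
            have h32 : 32+k = 32+k := rfl
            rw [Nat.add_comm 32 k, Nat.testBit_shiftLeft]
            simp [pvPoly_testBit]
          rw [this]; rfl
        exact topbit_lt h1 h2
      exact ih _ hu' 

theorem mmMainAux : ∀ y x k, x < 2^32 → mmP x y 0 < 2^(33+k) →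
    mmA x y 0 = mmRed (k+1) (mmP x y 0) := by
  intro y
  induction y using Nat.strong_induction_on with
  | _ y ih =>
    intro x k hx hp
    rcases eq_or_ne y 0 with rfl | h
    · rw [mmA_zero, mmP_zero, mmRed_id _ 0 (Nat.two_pow_pos 32)]
    · have hy : y / 2 < y := Nat.div_lt_self (Nat.pos_of_ne_zero h) one_lt_two
      have hxb : (if y % 2 = 1 then x else 0) < 2^32 := by
        split
        · exact hx
        · exact Nat.two_pow_pos 32
      have hprod : mmP x y 0 = (if y % 2 = 1 then x else 0) ^^^ (mmP x (y / 2) 0) <<< 1 := by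
        rw [mmP_unfold x h, mmP_double]
      have hshift : (mmP x (y / 2) 0) <<< 1 < 2^(33+k) := by
        have : (mmP x (y / 2) 0) <<< 1 = mmP x y 0 ^^^ (if y % 2 = 1 then x else 0) := by
          rw [hprod, Nat.xor_assoc,
            Nat.xor_comm (mmP x (y / 2) 0 <<< 1) (if y % 2 = 1 then x else 0),
            ← Nat.xor_assoc, Nat.xor_self, Nat.zero_xor]
        rw [this]
        exact Nat.xor_lt_two_pow hp
          (lt_of_lt_of_le hxb (Nat.pow_le_pow_right (by norm_num) (by omega)))
      have hu : mmP x (y / 2) 0 < 2^(32+k) := by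
        rw [Nat.shiftLeft_eq, pow_one] at hshift
        have h33 : (2:Nat)^(33+k) = 2^(32+k) * 2 := by
          rw [show 33+k = (32+k)+1 from by omega, pow_succ]
        omega
      -- the A side
      rw [mmA_succ x 0 h, mmA_acc, Nat.zero_xor, mmA_R, hprod]
      -- the B side
      rw [mmRed_linear, mmRed_id _ _ hxb, mmRed_R k _ hu]
      have hihl : mmA x (y / 2) 0 = mmRed k (mmP x (y / 2) 0) := by
        have h1 := ih (y / 2) hy x k hx
          (lt_of_lt_of_le hu (Nat.pow_le_pow_right (by norm_num) (by omega)))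
        rw [h1, mmRed_stable (k+1) k _ hu (Nat.le_succ k)]
      rw [hihl]
      congr 1
      rcases Nat.mod_two_eq_zero_or_one y with h2 | h2 <;> simp [h2]

theorem mmMain (y x k : Nat) (hx : x < 2^32) (h : mmP x y 0 < 2^(32+k)) :
    mmA x y 0 = mmRed k (mmP x y 0) := by
  have h' : mmP x y 0 < 2^(33+k) :=
    lt_of_lt_of_le h (Nat.pow_le_pow_right (by norm_num) (by omega))
  rw [mmMainAux y x k hx h', mmRed_stable (k+1) k _ h (Nat.le_succ k)]

theorem pvRed_choice (p : Nat) (hp : p < 2^(32+32)) :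
    mmRed 32 p = mmRed (Nat.log2 p - 31) p := by
  have hk : Nat.log2 p - 31 ≤ 32 := by
    rcases eq_or_ne p 0 with rfl | h0
    · simp [Nat.log2]
    · have : Nat.log2 p < 64 := by
        rw [Nat.log2_lt h0]
        exact lt_of_lt_of_le hp (by norm_num)
      omega
  have hpk : p < 2^(32 + (Nat.log2 p - 31)) := by
    by_cases hL : Nat.log2 p ≤ 31
    · have h1 : p < 2^(Nat.log2 p + 1) := Nat.lt_log2_self
      exact lt_of_lt_of_le h1 (Nat.pow_le_pow_right (by norm_num) (by omega))
    · have h1 : p < 2^(Nat.log2 p + 1) := Nat.lt_log2_self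
      have h2 : 32 + (Nat.log2 p - 31) = Nat.log2 p + 1 := by omega
      rw [h2]
      exact h1
  exact mmRed_stable 32 (Nat.log2 p - 31) p hpk hk

-- ===== VERDICT (by name: the statement is the Claim_ definition above) =====
theorem multiplyMod_spec : Claim_equal_multiplyMod := by
  intro x y hdom hpre
  obtain ⟨hx0, hy0⟩ := hpre
  unfold Spec_multiplyMod multiplyMod multiplyMod_alt
  have hng : ¬ (x < 0 ∨ y < 0) := by omega
  rw [if_neg hng, if_neg hng]
  have hdom' : x ≤ 2147483648 ∧ y ≤ 2147483648 := by
    unfold Dom_multiplyMod pvDomInt at hdom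
    simp only [Bool.and_eq_true, decide_eq_true_eq] at hdom
    exact ⟨hdom.1.2, hdom.2.2⟩
  have ha : x.toNat < 2^32 := by omega
  have hb : y.toNat < 2^32 := by omega
  have hp : mmP x.toNat y.toNat 0 < 2^(32+32) := mmP_lt 32 y.toNat hb 32 x.toNat ha
  have hA : mmA x.toNat y.toNat 0 = mmRed 32 (mmP x.toNat y.toNat 0) :=
    mmMain y.toNat x.toNat 32 ha hp
  show Int.ofNat (mmA x.toNat y.toNat 0) =
    Int.ofNat (mmRed (Nat.log2 (mmP x.toNat y.toNat 0) - 31) (mmP x.toNat y.toNat 0))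
  rw [hA, pvRed_choice _ hp]
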